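-- pv_equiv track=rewrite | github.com/Alexmust2/leetcode-codewars.tasks | CodeWars/Pillars.py | pillars
-- ===== SOURCE A (Python) =====
-- def pillars(num_pill, dist, width):
--     if num_pill == 1:
--         return 0
--     if num_pill == 2:
--         return dist * 100
--     s = 0
--     n = 0
--     num_pill = num_pill - 2
--     while num_pill != n:
--         s += width
--         n += 1
--     return s + (dist * (num_pill + 1)) * 100
-- ===== SOURCE B (Python) =====
-- def pillars(num_pill, dist, width):
--     if num_pill == 1:
--         return 0
--     if num_pill == 2:
--         return dist * 100
--     return width * (num_pill - 2) + dist * (num_pill - 1) * 100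
-- ===== Notes on version B (the rewrite author's own statement) =====
-- stated objective: faster
-- what changed: Replaced the while loop that adds width one step at a time with the closed form width*(num_pill-2) + dist*(num_pill-1)*100.
import Mathlib
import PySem

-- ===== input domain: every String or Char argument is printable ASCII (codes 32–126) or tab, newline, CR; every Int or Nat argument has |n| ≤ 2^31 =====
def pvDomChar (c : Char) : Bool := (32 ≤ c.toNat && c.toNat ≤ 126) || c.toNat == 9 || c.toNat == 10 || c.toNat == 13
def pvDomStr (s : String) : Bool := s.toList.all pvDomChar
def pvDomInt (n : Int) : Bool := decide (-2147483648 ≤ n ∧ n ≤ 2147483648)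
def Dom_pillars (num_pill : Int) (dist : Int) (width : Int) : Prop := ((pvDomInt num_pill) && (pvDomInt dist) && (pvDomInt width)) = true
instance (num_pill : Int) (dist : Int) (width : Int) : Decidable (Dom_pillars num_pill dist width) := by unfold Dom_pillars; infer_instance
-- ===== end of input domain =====

-- B replaces A's step-by-step width-accumulation loop with a closed-form formula (O(1) vs O(n)).


-- ===== PORT A =====
-- the while loop `while num_pill != n: s += width; n += 1`; fuel only makes it total
-- (on Pre_ the fuel is sufficient, see lemma pillarsLoop_run below)
def pillarsLoop (width : Int) (target : Int) (s : Int) (n : Int) : Nat → Int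
  | 0 => s
  | fuel + 1 => if target ≠ n then pillarsLoop width target (s + width) (n + 1) fuel else s

def pillars (num_pill : Int) (dist : Int) (width : Int) : Int :=
  if num_pill == 1 then 0
  else if num_pill == 2 then dist * 100
  else
    let m := num_pill - 2
    pillarsLoop width m 0 0 (m.toNat + 1) + (dist * (m + 1)) * 100

-- ===== PORT B =====
def pillars_alt (num_pill : Int) (dist : Int) (width : Int) : Int :=
  if num_pill == 1 then 0
  else if num_pill == 2 then dist * 100
  else width * (num_pill - 2) + dist * (num_pill - 1) * 100

-- ===== PRECONDITION & SPEC =====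
-- Pre_ excludes num_pill ≤ 0, where A's while loop never terminates (target num_pill-2 is negative)
def Pre_pillars (num_pill : Int) (dist : Int) (width : Int) : Prop := 1 ≤ num_pill
instance (num_pill : Int) (dist : Int) (width : Int) : Decidable (Pre_pillars num_pill dist width) := by unfold Pre_pillars; infer_instance
def pvWitness_pillars : Int × Int × Int := (5, 3, 2)

def Spec_pillars (num_pill : Int) (dist : Int) (width : Int) (out : Int) : Prop := out = pillars_alt num_pill dist width
instance (num_pill : Int) (dist : Int) (width : Int) (out : Int) : Decidable (Spec_pillars num_pill dist width out) := by unfold Spec_pillars; infer_instance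

-- ===== CLAIM (what is proved, stated in full; the proofs are below) =====
def Claim_equal_pillars : Prop := ∀ (num_pill : Int) (dist : Int) (width : Int), Dom_pillars num_pill dist width → Pre_pillars num_pill dist width → Spec_pillars num_pill dist width (pillars num_pill dist width)

-- ===== LEMMAS AND PROOFS =====
theorem pillarsLoop_run (width : Int) (k : Nat) :
    ∀ (s n : Int), pillarsLoop width (n + k) s n (k + 1) = s + width * k := by
  induction k with
  | zero => intro s n; simp [pillarsLoop]
  | succ k ih =>
    intro s n
    have hne : n + ((k + 1 : Nat) : Int) ≠ n := by push_cast; omega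
    rw [pillarsLoop, if_pos hne]
    have h2 : (n : Int) + ((k + 1 : Nat) : Int) = (n + 1) + (k : Int) := by push_cast; ring
    rw [h2, ih]
    push_cast; ring

-- ===== VERDICT (by name: the statement is the Claim_ definition above) =====
theorem pillars_spec : Claim_equal_pillars := by
  intro num_pill dist width _ hpre
  unfold Spec_pillars pillars pillars_alt
  by_cases h1 : num_pill = 1
  · simp [h1]
  by_cases h2 : num_pill = 2
  · simp [h2]
  have h3 : 3 ≤ num_pill := by
    unfold Pre_pillars at hpre; omega
  simp only [beq_iff_eq, if_neg h1, if_neg h2]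
  have hm : (0 : Int) ≤ num_pill - 2 := by omega
  have hk : num_pill - 2 = ((num_pill - 2).toNat : Int) := by omega
  have := pillarsLoop_run width (num_pill - 2).toNat 0 0
  rw [zero_add, ← hk] at this
  rw [show num_pill - 2 = (0 : Int) + (num_pill - 2) by ring] at this
  simp only [zero_add] at this ⊢
  rw [this]
  ring
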